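-- pv_equiv track=rewrite | github.com/SauravSinha76/scaler2 | class12/count_triplet.py | solve
-- ===== SOURCE A (Python) =====
-- def solve(A):
--     n = len(A)
--     ans = 0
--     for i in range(1,n-1):
--         l =0
--         r = 0
--         for j in range(i-1,-1,-1):
--             if A[i] > A[j]:
--                 l += 1
--         for j in range(i+1,n):
--             if A[i] < A[j]:
--                 r += 1
--         ans += (l*r)
--     return ans
-- ===== SOURCE B (Python) =====
-- def _count_below(s, x, strict):
--     # number of leading elements of ascending-sorted s that are < x (strict) resp. <= x
--     lo, hi = 0, len(s)
--     while lo < hi: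
--         mid = (lo + hi) // 2
--         if (s[mid] < x) if strict else (s[mid] <= x):
--             lo = mid + 1
--         else:
--             hi = mid
--     return lo
--
--
-- def solve(A):
--     # pass 1 (right to left): r[j] = count of elements after j that are greater,
--     # read off a sorted multiset of the suffix by binary search
--     rs = []
--     suf = []
--     for x in reversed(A):
--         k = _count_below(suf, x, False)
--         rs.append(len(suf) - k)
--         suf.insert(k, x)
--     rs.reverse()
--     # pass 2 (left to right): l[j] = count of smaller elements before j, same idea
--     ans = 0
--     pre = []
--     for x, rv in zip(A, rs):
--         k = _count_below(pre, x, True)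
--         ans += k * rv
--         pre.insert(k, x)
--     return ans
-- ===== Notes on version B (the rewrite author's own statement) =====
-- stated objective: faster
-- what changed: Instead of rescanning the whole array before and after every middle index, B makes one right-to-left and one left-to-right sweep, each maintaining a sorted multiset of the elements seen so far and reading the smaller-before / larger-after count off by hand-written binary search, inserting each element at its sorted position.
import Mathlib
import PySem

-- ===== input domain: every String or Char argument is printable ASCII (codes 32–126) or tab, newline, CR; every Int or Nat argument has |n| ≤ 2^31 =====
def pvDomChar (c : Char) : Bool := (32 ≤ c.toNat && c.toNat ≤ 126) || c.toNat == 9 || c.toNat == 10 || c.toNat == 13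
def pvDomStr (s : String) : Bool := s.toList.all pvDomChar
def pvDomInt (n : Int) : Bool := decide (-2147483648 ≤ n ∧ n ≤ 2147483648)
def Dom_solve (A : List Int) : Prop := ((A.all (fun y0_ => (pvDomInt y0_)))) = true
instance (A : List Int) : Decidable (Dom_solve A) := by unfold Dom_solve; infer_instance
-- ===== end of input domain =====

-- B replaces A's per-middle-index rescans by two sweeps that maintain a sorted
-- multiset and read each count off by binary search (objective: faster, constant-factor).

-- ===== PORT A =====
def solve (A : List Int) : Int :=
  let n : Int := A.length
  (PySem.List.pyRange 1 (n - 1) 1).foldl (fun ans i =>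
    let l : Int := (PySem.List.pyRange (i - 1) (-1) (-1)).foldl
      (fun l j => if PySem.List.pyGetD A i 0 > PySem.List.pyGetD A j 0 then l + 1 else l) 0
    let r : Int := (PySem.List.pyRange (i + 1) n 1).foldl
      (fun r j => if PySem.List.pyGetD A i 0 < PySem.List.pyGetD A j 0 then r + 1 else r) 0
    ans + l * r) 0

-- ===== PORT B =====
-- the while-loop of _count_below, with fuel hi - lo ≤ s.length making the
-- recursion structural (each iteration shrinks hi - lo by at least 1);
-- s[mid] is always in range at every call site (0 ≤ lo ≤ hi ≤ len s), so pyGetD is exact here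
def cbLoop (s : List Int) (x : Int) (strict : Bool) : Nat → Nat → Nat → Nat
  | 0, lo, _ => lo
  | fuel + 1, lo, hi =>
    if lo < hi then
      let mid := (lo + hi) / 2
      if (if strict then decide (PySem.List.pyGetD s (mid : Int) 0 < x)
          else decide (PySem.List.pyGetD s (mid : Int) 0 ≤ x)) then
        cbLoop s x strict fuel (mid + 1) hi
      else
        cbLoop s x strict fuel lo mid
    else lo

def countBelow (s : List Int) (x : Int) (strict : Bool) : Nat :=
  cbLoop s x strict s.length 0 s.length

def solve_alt (A : List Int) : Int :=
  let st := A.reverse.foldl (fun (st : List Int × List Int) x =>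
    let k := countBelow st.1 x false
    (PySem.List.insert st.1 (k : Int) x, st.2 ++ [((st.1.length : Int) - (k : Int))]))
    ([], [])
  let rs := st.2.reverse
  let st2 := (A.zip rs).foldl (fun (st : Int × List Int) p =>
    let k := countBelow st.2 p.1 true
    (st.1 + (k : Int) * p.2, PySem.List.insert st.2 (k : Int) p.1)) (0, [])
  st2.1

-- ===== PRECONDITION & SPEC =====
def Spec_solve (A : List Int) (out : Int) : Prop := out = solve_alt A
instance (A : List Int) (out : Int) : Decidable (Spec_solve A out) := by unfold Spec_solve; infer_instance

-- ===== CLAIM (what is proved, stated in full; the proofs are below) =====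
def Claim_equal_solve : Prop := ∀ (A : List Int), Dom_solve A → Spec_solve A (solve A)

-- ===== LEMMAS AND PROOFS =====

-- spec counts: smaller-before and larger-after for middle index j
def lcnt (A : List Int) (j : Nat) : Int :=
  ((A.take j).countP (fun y => decide (y < A.getD j 0)) : Int)

def rcnt (A : List Int) (j : Nat) : Int :=
  ((A.drop (j + 1)).countP (fun y => decide (A.getD j 0 < y)) : Int)

-- sum of lcnt*rcnt over indices j, j+1, …, n-1
def tailSum (A : List Int) (j : Nat) : Int :=
  ((List.range (A.length - j)).map (fun k => lcnt A (j + k) * rcnt A (j + k))).sum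

-- a predicate holding exactly on the first k positions has count k
theorem countP_boundary (s : List Int) (P : Int → Bool) (k : Nat) (hk : k ≤ s.length)
    (h1 : ∀ j (hj : j < s.length), j < k → P s[j] = true)
    (h2 : ∀ j (hj : j < s.length), k ≤ j → P s[j] = false) : s.countP P = k := by
  conv_lhs => rw [← List.take_append_drop k s]
  rw [List.countP_append]
  have ht : (s.take k).countP P = (s.take k).length := by
    rw [List.countP_eq_length]
    intro a ha
    obtain ⟨i, hi, rfl⟩ := List.mem_iff_getElem.mp ha
    have hi2 : i < k ∧ i < s.length := by simpa using hi
    rw [List.getElem_take]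
    exact h1 i hi2.2 hi2.1
  have hd : (s.drop k).countP P = 0 := by
    rw [List.countP_eq_zero]
    intro a ha
    obtain ⟨i, hi, rfl⟩ := List.mem_iff_getElem.mp ha
    rw [List.getElem_drop]
    simp [h2 (k + i) (by simp at hi; omega) (by omega)]
  rw [ht, hd, List.length_take]
  omega

-- in a sorted list, an antitone predicate holds exactly on the first countP positions
theorem sorted_countP_iff (s : List Int) (P : Int → Bool)
    (hP : ∀ y z : Int, y ≤ z → P z = true → P y = true) (hs : s.Pairwise (· ≤ ·)) :
    ∀ j (hj : j < s.length), (P s[j] = true ↔ j < s.countP P) := by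
  induction s with
  | nil => intro j hj; simp at hj
  | cons y t ih =>
    have hyt : ∀ z ∈ t, y ≤ z := (List.pairwise_cons.mp hs).1
    have hst : t.Pairwise (· ≤ ·) := (List.pairwise_cons.mp hs).2
    intro j hj
    by_cases hy : P y = true
    · cases j with
      | zero => simp [hy, List.countP_cons, hy]
      | succ i =>
        have hih := ih hst i (by simpa using hj)
        simp only [List.getElem_cons_succ, List.countP_cons, hy, if_true]
        rw [hih]
        omega
    · have ht0 : t.countP P = 0 := by
        rw [List.countP_eq_zero]
        intro z hz hPz
        exact hy (hP y z (hyt z hz) hPz)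
      have hall : ∀ i (hi : i < (y :: t).length), P (y :: t)[i] = false := by
        intro i hi
        cases i with
        | zero => simpa [Bool.not_eq_true] using hy
        | succ m =>
          have hm : (y :: t)[m + 1] ∈ t := by
            simpa using List.getElem_mem (l := t) (i := m) (by simpa using hi)
          by_contra hc
          have : P (y :: t)[m + 1] = true := by
            cases h : P (y :: t)[m + 1] with
            | false => exact absurd h hc
            | true => rfl
          rw [List.countP_eq_zero] at ht0
          exact ht0 _ hm this
      have hcount : (y :: t).countP P = 0 := by
        rw [List.countP_cons, ht0]; simp [hy]
      constructor
      · intro h; rw [hall j hj] at h; simp at h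
      · intro h; rw [hcount] at h; omega

-- the binary search computes countP of its predicate on a sorted list
theorem cbLoop_eq (s : List Int) (x : Int) (strict : Bool)
    (hs : s.Pairwise (· ≤ ·)) :
    ∀ (fuel lo hi : Nat), hi - lo ≤ fuel → lo ≤ hi → hi ≤ s.length →
    (∀ j (hj : j < s.length), j < lo →
        (if strict then decide (s[j] < x) else decide (s[j] ≤ x)) = true) →
    (∀ j (hj : j < s.length), hi ≤ j →
        (if strict then decide (s[j] < x) else decide (s[j] ≤ x)) = false) →
    cbLoop s x strict fuel lo hi
      = s.countP (fun y => if strict then decide (y < x) else decide (y ≤ x)) := by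
  intro fuel
  induction fuel with
  | zero =>
    intro lo hi hf hlh hhl h1 h2
    have : lo = hi := by omega
    subst this
    rw [cbLoop]
    exact (countP_boundary s _ lo (le_trans hlh hhl) h1 (fun j hj hk => h2 j hj hk)).symm
  | succ m ih =>
    intro lo hi hf hlh hhl h1 h2
    by_cases hlt : lo < hi
    · rw [cbLoop]
      rw [if_pos hlt]
      have hmid1 : lo ≤ (lo + hi) / 2 := by omega
      have hmid2 : (lo + hi) / 2 < hi := by omega
      have hmlen : (lo + hi) / 2 < s.length := by omega
      have hget : PySem.List.pyGetD s (((lo + hi) / 2 : Nat) : Int) 0 = s[(lo + hi) / 2] := by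
        rw [PySem.List.pyGetD_natCast, List.getD_eq_getElem s 0 hmlen]
      by_cases hp : (if strict then decide (s[(lo + hi) / 2] < x) else decide (s[(lo + hi) / 2] ≤ x)) = true
      · rw [if_pos (by rw [hget]; exact hp)]
        apply ih ((lo + hi) / 2 + 1) hi (by omega) (by omega) hhl
        · intro j hj hjlt
          by_cases hjm : j < lo
          · exact h1 j hj hjm
          · -- lo ≤ j ≤ mid : use sortedness + hp
            have hle : s[j] ≤ s[(lo + hi) / 2] := by
              rcases Nat.lt_or_ge j ((lo + hi) / 2) with h | h
              · exact List.pairwise_iff_getElem.mp hs j _ hj hmlen h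
              · have : j = (lo + hi) / 2 := by omega
                subst this; exact le_refl _
            cases strict with
            | true => simp only [if_pos rfl] at hp ⊢; simp at hp ⊢; omega
            | false => simp only [Bool.false_eq_true, if_neg] at hp ⊢; simp at hp ⊢; omega
        · exact h2
      · rw [if_neg (by rw [hget]; exact hp)]
        apply ih lo ((lo + hi) / 2) (by omega) (by omega) (by omega) h1
        · intro j hj hjge
          -- mid ≤ j : antitone gives false
          have hle : s[(lo + hi) / 2] ≤ s[j] := by
            rcases Nat.lt_or_ge ((lo + hi) / 2) j with h | h
            · exact List.pairwise_iff_getElem.mp hs _ j hmlen hj h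
            · have : j = (lo + hi) / 2 := by omega
              subst this; exact le_refl _
          cases strict with
          | true => simp only [if_pos rfl] at hp ⊢; simp at hp ⊢; omega
          | false => simp only [Bool.false_eq_true, if_neg] at hp ⊢; simp at hp ⊢; omega
    · have : lo = hi := by omega
      subst this
      rw [cbLoop]
      rw [if_neg hlt]
      exact (countP_boundary s _ lo (le_trans hlh hhl) h1 (fun j hj hk => h2 j hj hk)).symm

theorem countBelow_false (s : List Int) (x : Int) (hs : s.Pairwise (· ≤ ·)) :
    countBelow s x false = s.countP (fun y => decide (y ≤ x)) := by
  have := cbLoop_eq s x false hs s.length 0 s.length (by omega) (by omega) (le_refl _)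
    (by intro j hj h; omega) (by intro j hj h; omega)
  simpa [countBelow] using this

theorem countBelow_true (s : List Int) (x : Int) (hs : s.Pairwise (· ≤ ·)) :
    countBelow s x true = s.countP (fun y => decide (y < x)) := by
  have := cbLoop_eq s x true hs s.length 0 s.length (by omega) (by omega) (le_refl _)
    (by intro j hj h; omega) (by intro j hj h; omega)
  simpa [countBelow] using this

-- inserting at the boundary position keeps the list sorted
theorem insert_sorted (s : List Int) (x : Int) (k : Nat) (hk : k ≤ s.length)
    (hs : s.Pairwise (· ≤ ·))
    (h1 : ∀ j (hj : j < s.length), j < k → s[j] ≤ x)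
    (h2 : ∀ j (hj : j < s.length), k ≤ j → x ≤ s[j]) :
    (s.take k ++ x :: s.drop k).Pairwise (· ≤ ·) := by
  rw [List.pairwise_append]
  refine ⟨hs.sublist (List.take_sublist k s), ?_, ?_⟩
  · rw [List.pairwise_cons]
    refine ⟨?_, hs.sublist (List.drop_sublist k s)⟩
    intro z hz
    obtain ⟨i, hi, rfl⟩ := List.mem_iff_getElem.mp hz
    rw [List.getElem_drop]
    exact h2 (k + i) (by simp at hi; omega) (by omega)
  · intro a ha b hb
    obtain ⟨i, hi, rfl⟩ := List.mem_iff_getElem.mp ha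
    have hik : i < k := by simp at hi; omega
    have hil : i < s.length := by simp at hi; omega
    rw [List.getElem_take]
    rcases List.mem_cons.mp hb with rfl | hb'
    · exact h1 i hil hik
    · obtain ⟨m, hm, rfl⟩ := List.mem_iff_getElem.mp hb'
      rw [List.getElem_drop]
      exact le_trans (h1 i hil hik) (h2 (k + m) (by simp at hm; omega) (by omega))

-- the r-values produced by pass 1, as a pure recursion over the remaining input
def rvals : List Int → List Int → List Int
  | [], _ => []
  | x :: L, seen => ((seen.countP (fun y => decide (x < y)) : Nat) : Int) :: rvals L (x :: seen)

-- the partial sums produced by pass 2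
def lsum : List (Int × Int) → List Int → Int
  | [], _ => 0
  | p :: ps, seen => ((seen.countP (fun y => decide (y < p.1)) : Nat) : Int) * p.2 + lsum ps (p.1 :: seen)

theorem pass1 : ∀ (L suf rs seen : List Int),
    suf.Pairwise (· ≤ ·) → suf.Perm seen →
    (L.foldl (fun (st : List Int × List Int) x =>
        let k := countBelow st.1 x false
        (PySem.List.insert st.1 (k : Int) x, st.2 ++ [((st.1.length : Int) - (k : Int))]))
      (suf, rs)).2
    = rs ++ rvals L seen := by
  intro L
  induction L with
  | nil => intro suf rs seen _ _; simp [rvals]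
  | cons x L ih =>
    intro suf rs seen hsort hperm
    simp only [List.foldl_cons]
    have hk : countBelow suf x false = suf.countP (fun y => decide (y ≤ x)) :=
      countBelow_false suf x hsort
    have hkle : suf.countP (fun y => decide (y ≤ x)) ≤ suf.length := List.countP_le_length
    have hins : PySem.List.insert suf ((countBelow suf x false : Nat) : Int) x
        = suf.take (countBelow suf x false) ++ x :: suf.drop (countBelow suf x false) :=
      PySem.List.insert_natCast suf _ x (by rw [hk]; exact hkle)
    have hsort' : (suf.take (countBelow suf x false) ++ x :: suf.drop (countBelow suf x false)).Pairwise (· ≤ ·) := by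
      apply insert_sorted suf x _ (by rw [hk]; exact hkle) hsort
      · intro j hj hjk
        have := (sorted_countP_iff suf (fun y => decide (y ≤ x))
          (fun y z hyz hz => by simp at hz ⊢; omega) hsort j hj).mpr (by rw [hk] at hjk; exact hjk)
        simpa using this
      · intro j hj hjk
        have := (sorted_countP_iff suf (fun y => decide (y ≤ x))
          (fun y z hyz hz => by simp at hz ⊢; omega) hsort j hj)
        rw [hk] at hjk
        by_contra hc
        have : j < suf.countP (fun y => decide (y ≤ x)) := this.mp (by simp; omega)
        omega
    have hperm' : (suf.take (countBelow suf x false) ++ x :: suf.drop (countBelow suf x false)).Perm (x :: seen) := by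
      refine List.Perm.trans List.perm_middle ?_
      simp only [List.take_append_drop]
      exact hperm.cons x
    have hval : (suf.length : Int) - ((countBelow suf x false : Nat) : Int)
        = ((seen.countP (fun y => decide (x < y)) : Nat) : Int) := by
      rw [hk]
      have hsplit := List.length_eq_countP_add_countP (fun y => decide (y ≤ x)) (l := suf)
      have hcongr : suf.countP (fun a => decide ¬(decide (a ≤ x) = true)) = suf.countP (fun y => decide (x < y)) := by
        apply List.countP_congr
        intro a _
        simp [not_le]
      have hpc : suf.countP (fun y => decide (x < y)) = seen.countP (fun y => decide (x < y)) :=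
        hperm.countP_eq _
      omega
    rw [hins] at *
    rw [ih _ _ (x :: seen) hsort' hperm', hval]
    all_goals simp [rvals, List.append_assoc]

theorem pass2 : ∀ (ps : List (Int × Int)) (ans : Int) (pre seen : List Int),
    pre.Pairwise (· ≤ ·) → pre.Perm seen →
    (ps.foldl (fun (st : Int × List Int) p =>
        let k := countBelow st.2 p.1 true
        (st.1 + ((k : Nat) : Int) * p.2, PySem.List.insert st.2 (k : Int) p.1)) (ans, pre)).1
    = ans + lsum ps seen := by
  intro ps
  induction ps with
  | nil => intro ans pre seen _ _; simp [lsum]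
  | cons p ps ih =>
    intro ans pre seen hsort hperm
    simp only [List.foldl_cons]
    have hk : countBelow pre p.1 true = pre.countP (fun y => decide (y < p.1)) :=
      countBelow_true pre p.1 hsort
    have hkle : pre.countP (fun y => decide (y < p.1)) ≤ pre.length := List.countP_le_length
    have hins : PySem.List.insert pre ((countBelow pre p.1 true : Nat) : Int) p.1
        = pre.take (countBelow pre p.1 true) ++ p.1 :: pre.drop (countBelow pre p.1 true) :=
      PySem.List.insert_natCast pre _ p.1 (by rw [hk]; exact hkle)
    have hsort' : (pre.take (countBelow pre p.1 true) ++ p.1 :: pre.drop (countBelow pre p.1 true)).Pairwise (· ≤ ·) := by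
      apply insert_sorted pre p.1 _ (by rw [hk]; exact hkle) hsort
      · intro j hj hjk
        have := (sorted_countP_iff pre (fun y => decide (y < p.1))
          (fun y z hyz hz => by simp at hz ⊢; omega) hsort j hj).mpr (by rw [hk] at hjk; exact hjk)
        simp at this; omega
      · intro j hj hjk
        have := (sorted_countP_iff pre (fun y => decide (y < p.1))
          (fun y z hyz hz => by simp at hz ⊢; omega) hsort j hj)
        rw [hk] at hjk
        by_contra hc
        have : j < pre.countP (fun y => decide (y < p.1)) := this.mp (by simp; omega)
        omega
    have hperm' : (pre.take (countBelow pre p.1 true) ++ p.1 :: pre.drop (countBelow pre p.1 true)).Perm (p.1 :: seen) := by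
      refine List.Perm.trans List.perm_middle ?_
      simp only [List.take_append_drop]
      exact hperm.cons p.1
    have hcnt : pre.countP (fun y => decide (y < p.1)) = seen.countP (fun y => decide (y < p.1)) :=
      hperm.countP_eq _
    rw [hins] at *
    rw [ih _ _ (p.1 :: seen) hsort' hperm']
    rw [hk, hcnt]
    simp [lsum]
    ring

theorem rvals_reverse : ∀ (B extra : List Int),
    rvals B.reverse extra
    = (((List.range B.length).map (fun j =>
        (((B.drop (j + 1) ++ extra).countP (fun y => decide (B.getD j 0 < y)) : Nat) : Int)))).reverse := by
  intro B
  induction B using List.reverseRecOn with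
  | nil => intro extra; simp [rvals]
  | append_singleton B x ih =>
    intro extra
    rw [List.reverse_append]
    simp only [List.reverse_singleton, List.singleton_append]
    rw [rvals]  -- unfold one step
    rw [ih (x :: extra)]
    have hlen : (B ++ [x]).length = B.length + 1 := by simp
    rw [hlen, List.range_succ, List.map_append, List.reverse_append]
    simp only [List.map_cons, List.map_nil, List.reverse_cons, List.reverse_nil, List.nil_append,
      List.singleton_append]
    congr 1
    · -- head: index B.length
      have hd : (B ++ [x]).drop (B.length + 1) = [] := by
        rw [List.drop_eq_nil_iff]; simp
      have hg : (B ++ [x]).getD B.length 0 = x := by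
        rw [List.getD_eq_getElem _ 0 (by simp)]
        simp
      rw [hd, hg]
      simp
    · -- tail: indices below B.length
      congr 1
      apply List.map_congr_left
      intro j hj
      have hjB : j < B.length := List.mem_range.mp hj
      have h1 : (B ++ [x]).drop (j + 1) = B.drop (j + 1) ++ [x] :=
        List.drop_append_of_le_length (by omega)
      have h2 : (B ++ [x]).getD j 0 = B.getD j 0 := List.getD_append B [x] 0 j hjB
      rw [h1, h2, List.append_assoc]
      simp

theorem range_countP_take (A : List Int) (c : Int) : ∀ m, m ≤ A.length →
    (List.range m).countP (fun k => decide (A.getD k 0 < c))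
    = (A.take m).countP (fun y => decide (y < c)) := by
  intro m
  induction m with
  | zero => intro _; simp
  | succ m ih =>
    intro hm
    rw [List.range_succ, List.countP_append, List.take_succ, List.countP_append]
    rw [ih (by omega)]
    congr 1
    have hmA : m < A.length := by omega
    simp [List.getElem?_eq_getElem hmA, List.getD_eq_getElem A 0 hmA, List.countP_cons]

theorem tailSum_succ (A : List Int) (j : Nat) (hj : j < A.length) :
    tailSum A j = lcnt A j * rcnt A j + tailSum A (j + 1) := by
  unfold tailSum
  have h : A.length - j = (A.length - (j + 1)) + 1 := by omega
  rw [h, List.range_succ_eq_map]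
  simp only [List.map_cons, List.sum_cons, Nat.add_zero]
  congr 2
  rw [List.map_map]
  apply List.map_congr_left
  intro k _
  simp only [Function.comp_apply]
  congr 2 <;> omega

theorem tailSum_last (A : List Int) (j : Nat) (hj : A.length ≤ j) : tailSum A j = 0 := by
  unfold tailSum
  have : A.length - j = 0 := by omega
  rw [this]
  simp

theorem lsum_spec (A : List Int) : ∀ (d j : Nat) (seen : List Int),
    A.length - j = d → j ≤ A.length → seen.Perm (A.take j) →
    lsum ((A.drop j).zip
      ((((List.range A.length).map (fun i => rcnt A i))).drop j)) seen
    = tailSum A j := by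
  intro d
  induction d with
  | zero =>
    intro j seen hd hj _
    have : j = A.length := by omega
    subst this
    rw [List.drop_length]
    simp [lsum, tailSum_last A A.length (le_refl _)]
  | succ m ih =>
    intro j seen hd hj hperm
    have hjlt : j < A.length := by omega
    rw [List.drop_eq_getElem_cons hjlt]
    have hrg : ((List.range A.length).map (fun i => rcnt A i)).drop j
        = rcnt A j :: ((List.range A.length).map (fun i => rcnt A i)).drop (j + 1) := by
      rw [List.drop_eq_getElem_cons (by simpa using hjlt)]
      congr 1
      rw [List.getElem_map]
      congr 1
      exact List.getElem_range _
    rw [hrg, List.zip_cons_cons, lsum]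
    have hcnt : seen.countP (fun y => decide (y < A[j])) = (A.take j).countP (fun y => decide (y < A[j])) :=
      hperm.countP_eq _
    have hlc : ((seen.countP (fun y => decide (y < A[j])) : Nat) : Int) = lcnt A j := by
      rw [hcnt]
      unfold lcnt
      congr 2
      funext y
      rw [List.getD_eq_getElem A 0 hjlt]
    have hperm' : (A[j] :: seen).Perm (A.take (j + 1)) := by
      have h2 : A.take (j + 1) = A.take j ++ [A[j]] := by
        rw [List.take_succ, List.getElem?_eq_getElem hjlt]; rfl
      rw [h2]
      exact (hperm.cons _).trans (List.perm_append_singleton _ _).symm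
    rw [ih (j + 1) (A[j] :: seen) (by omega) (by omega) hperm']
    rw [hlc, tailSum_succ A j hjlt]

-- the per-middle-index product computed by A's loop body
def gA (A : List Int) (i : Int) : Int :=
  ((PySem.List.pyRange (i - 1) (-1) (-1)).foldl
      (fun l j => if PySem.List.pyGetD A i 0 > PySem.List.pyGetD A j 0 then l + 1 else l) 0)
  * ((PySem.List.pyRange (i + 1) ((A.length : Int)) 1).foldl
      (fun r j => if PySem.List.pyGetD A i 0 < PySem.List.pyGetD A j 0 then r + 1 else r) 0)

theorem gA_eq (A : List Int) (k : Nat) (hk : k < A.length) :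
    gA A ((k : Nat) : Int) = lcnt A k * rcnt A k := by
  unfold gA
  congr 1
  · -- left count
    rw [PySem.List.pyRange_neg_one_eq_reverse]
    have h0 : ((-1 : Int) + 1) = 0 := by ring
    have h1 : ((k : Int) - 1 + 1) = (k : Int) := by ring
    rw [h0, h1]
    rw [PySem.List.foldl_ite_add_one]
    rw [List.countP_reverse]
    rw [PySem.List.pyRange_zero]
    rw [List.countP_map]
    have : ((k : Int)).toNat = k := by omega
    rw [this]
    have hcp : (List.range k).countP
        ((fun j => decide (PySem.List.pyGetD A (k : Int) 0 > PySem.List.pyGetD A j 0)) ∘ (fun m : Nat => (m : Int)))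
        = (List.range k).countP (fun m => decide (A.getD m 0 < A.getD k 0)) := by
      apply List.countP_congr
      intro m hm
      simp only [Function.comp_apply, PySem.List.pyGetD_natCast, gt_iff_lt]
    rw [hcp, range_countP_take A (A.getD k 0) k (by omega)]
    unfold lcnt
    simp
  · -- right count
    rw [PySem.List.foldl_pyRange_pyGetD' A 0
      (fun r y => if PySem.List.pyGetD A (k : Int) 0 < y then r + 1 else r) 0 (by positivity)]
    rw [PySem.List.foldl_ite_add_one]
    have ht : ((k : Int) + 1).toNat = k + 1 := by omega
    rw [ht]
    unfold rcnt
    simp [PySem.List.pyGetD_natCast]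

theorem solveA_eq (A : List Int) : solve A = tailSum A 0 := by
  have h1 : solve A
      = (PySem.List.pyRange 1 ((A.length : Int) - 1) 1).foldl (fun ans i => ans + gA A i) 0 := rfl
  rw [h1, PySem.List.foldl_add _ (gA A) 0, zero_add]
  have hts : tailSum A 0 = ((List.range A.length).map (fun k => lcnt A k * rcnt A k)).sum := by
    unfold tailSum
    simp
  rw [hts]
  match hn : A.length with
  | 0 => rw [PySem.List.pyRange_one_eq_nil (by simp)]; simp
  | 1 =>
    rw [PySem.List.pyRange_one_eq_nil (by norm_num)]
    simp [lcnt]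
  | (m + 2) =>
    have hr : PySem.List.pyRange 1 (((m + 2 : Nat) : Int) - 1) 1
        = (List.range m).map (fun (k : Nat) => 1 + (k : Int)) := by
      rw [PySem.List.pyRange_one]
      have htn : ((((m + 2 : Nat)) : Int) - 1 - 1).toNat = m := by omega
      rw [htn]
    rw [hr, List.map_map]
    have hlhs : ((List.range m).map (gA A ∘ fun (k : Nat) => 1 + (k : Int))).sum
        = ((List.range m).map (fun k => lcnt A (k + 1) * rcnt A (k + 1))).sum := by
      congr 1
      apply List.map_congr_left
      intro k hkm
      have hkm' : k < m := List.mem_range.mp hkm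
      have : (1 : Int) + (k : Int) = ((k + 1 : Nat) : Int) := by push_cast; ring
      simp only [Function.comp_apply, this]
      exact gA_eq A (k + 1) (by omega)
    rw [hlhs]
    rw [List.range_succ, List.range_succ_eq_map]
    simp only [List.map_append, List.map_cons, List.sum_append, List.sum_cons, List.map_map]
    have hf0 : lcnt A 0 * rcnt A 0 = 0 := by
      unfold lcnt; simp
    have hflast : lcnt A (m + 1) * rcnt A (m + 1) = 0 := by
      unfold rcnt
      have : A.drop (m + 1 + 1) = [] := by
        rw [List.drop_eq_nil_iff]; omega
      rw [this]; simp
    rw [hf0, hflast]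
    have : (List.range m).map ((fun k => lcnt A k * rcnt A k) ∘ Nat.succ)
        = (List.range m).map (fun k => lcnt A (k + 1) * rcnt A (k + 1)) := by
      apply List.map_congr_left
      intro k _
      simp [Nat.succ_eq_add_one]
    simp [this]

theorem solveB_eq (A : List Int) : solve_alt A = tailSum A 0 := by
  have hst : (A.reverse.foldl (fun (st : List Int × List Int) x =>
        let k := countBelow st.1 x false
        (PySem.List.insert st.1 (k : Int) x, st.2 ++ [((st.1.length : Int) - (k : Int))]))
      ([], [])).2 = rvals A.reverse [] := by
    simpa using pass1 A.reverse [] [] [] (by simp) (List.Perm.refl [])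
  have hrs : ((A.reverse.foldl (fun (st : List Int × List Int) x =>
        let k := countBelow st.1 x false
        (PySem.List.insert st.1 (k : Int) x, st.2 ++ [((st.1.length : Int) - (k : Int))]))
      ([], [])).2).reverse = (List.range A.length).map (fun i => rcnt A i) := by
    rw [hst, rvals_reverse A [], List.reverse_reverse]
    apply List.map_congr_left
    intro j _
    simp [rcnt]
  show ((A.zip ((A.reverse.foldl (fun (st : List Int × List Int) x =>
        let k := countBelow st.1 x false
        (PySem.List.insert st.1 (k : Int) x, st.2 ++ [((st.1.length : Int) - (k : Int))]))
      ([], [])).2.reverse)).foldl (fun (st : Int × List Int) p =>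
        let k := countBelow st.2 p.1 true
        (st.1 + (k : Int) * p.2, PySem.List.insert st.2 (k : Int) p.1)) (0, [])).1
    = tailSum A 0
  rw [hrs]
  rw [pass2 (A.zip ((List.range A.length).map fun i => rcnt A i)) 0 [] [] (by simp) (List.Perm.refl [])]
  rw [zero_add]
  have := lsum_spec A A.length 0 [] (by omega) (by omega) (by simp)
  simpa using this

-- ===== VERDICT (by name: the statement is the Claim_ definition above) =====
theorem solve_spec : Claim_equal_solve := by
  intro A _
  unfold Spec_solve
  rw [solveA_eq, solveB_eq]
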